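-- pv_equiv track=rewrite | github.com/greentopsecret/code-challenges | facebook/answer_queries.py | solution
-- ===== SOURCE A (Python) =====
-- from bisect import bisect_left
--
-- def solution(arr: list) -> list:
-- 	true_indexes = set()
-- 	for query, idx in arr:
-- 		if query == 1:  # set
-- 			true_indexes.add(idx)
--
-- 	true_indexes = sorted(list(true_indexes))
--
-- 	result = []
-- 	for query, idx in arr:
-- 		if query == 2:  # get
-- 			r = bisect_left(true_indexes, idx)
-- 			if r == len(true_indexes):
-- 				result.append(-1)
-- 			else:
-- 				result.append(true_indexes[r])
--
-- 	return result
-- ===== SOURCE B (Python) =====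
-- def solution(arr: list) -> list:
--     true_indexes = {i for q, i in arr if q == 1}
--     return [min((i for i in true_indexes if i >= idx), default=-1)
--             for q, idx in arr if q == 2]
-- ===== Notes on version B (the rewrite author's own statement) =====
-- stated objective: simpler
-- what changed: B drops the sorted list and bisect_left entirely: it builds the set of true indices once and answers each get-query by a direct min over the set's elements >= idx with default -1.
import Mathlib
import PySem

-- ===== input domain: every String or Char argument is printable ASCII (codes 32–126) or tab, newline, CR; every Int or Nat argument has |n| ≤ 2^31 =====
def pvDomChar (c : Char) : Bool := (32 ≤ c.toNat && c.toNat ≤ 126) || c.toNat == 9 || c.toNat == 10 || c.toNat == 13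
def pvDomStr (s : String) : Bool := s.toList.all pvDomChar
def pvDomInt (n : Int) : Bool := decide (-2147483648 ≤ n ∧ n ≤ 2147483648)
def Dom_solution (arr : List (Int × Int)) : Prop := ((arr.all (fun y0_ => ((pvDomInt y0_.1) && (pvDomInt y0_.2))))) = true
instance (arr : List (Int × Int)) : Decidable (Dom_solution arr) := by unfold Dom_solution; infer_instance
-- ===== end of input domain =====

-- B replaces A's sort + binary search by a direct linear minimum over the set (min of indices ≥ idx, default -1); objective: simpler.

-- ===== PORT A =====
def solution (arr : List (Int × Int)) : List Int :=
  let trueIdx : PySem.Set Int :=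
    arr.foldl (fun s p => if p.1 == 1 then PySem.Set.add s p.2 else s) PySem.Set.empty
  let ts : List Int := PySem.List.sorted trueIdx (fun x => x)
  arr.foldl (fun res p =>
    if p.1 == 2 then
      let r := PySem.List.bisectLeft ts p.2
      if r = ts.length then res ++ [(-1 : Int)]
      else res ++ [PySem.List.pyGetD ts (r : Int) 0]
    else res) []

-- ===== PORT B =====
def solution_alt (arr : List (Int × Int)) : List Int :=
  let trueIdx : PySem.Set Int :=
    PySem.Set.ofList ((arr.filter (fun p => p.1 == 1)).map (fun p => p.2))
  (arr.filter (fun p => p.1 == 2)).map (fun p =>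
    match PySem.List.min? (trueIdx.filter (fun i => p.2 ≤ i)) (fun x => x) with
    | none => -1
    | some v => v)

-- ===== PRECONDITION & SPEC =====
def Spec_solution (arr : List (Int × Int)) (out : List Int) : Prop := out = solution_alt arr
instance (arr : List (Int × Int)) (out : List Int) : Decidable (Spec_solution arr out) := by unfold Spec_solution; infer_instance

-- ===== CLAIM (what is proved, stated in full; the proofs are below) =====
def Claim_equal_solution : Prop := ∀ (arr : List (Int × Int)), Dom_solution arr → Spec_solution arr (solution arr)

-- ===== LEMMAS AND PROOFS =====

-- A's set-building loop equals the fold of add over the filtered elements.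
theorem foldl_add_if_filter (l : List (Int × Int)) (s : PySem.Set Int) :
    l.foldl (fun s p => if p.1 == 1 then PySem.Set.add s p.2 else s) s
      = (l.filter (fun p => p.1 == 1)).foldl (fun s p => PySem.Set.add s p.2) s := by
  induction l generalizing s with
  | nil => rfl
  | cons h t ih =>
    rw [List.foldl_cons, List.filter_cons]
    by_cases hq : (h.1 == 1) = true
    · rw [if_pos hq, if_pos hq, List.foldl_cons, ih]
    · rw [if_neg hq, if_neg hq, ih]

-- A's set equals B's set.
theorem sets_eq (arr : List (Int × Int)) :
    arr.foldl (fun s p => if p.1 == 1 then PySem.Set.add s p.2 else s) PySem.Set.empty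
      = PySem.Set.ofList ((arr.filter (fun p => p.1 == 1)).map (fun p => p.2)) := by
  rw [foldl_add_if_filter, ← PySem.Set.update_empty, PySem.Set.update_map_eq_foldl_add]

-- Pointwise: bisect_left into the sorted set equals the minimum element ≥ idx (default -1).
theorem point (L : List Int) (idx : Int) :
    (if PySem.List.bisectLeft (PySem.List.sorted (PySem.Set.ofList L) (fun x => x)) idx
        = (PySem.List.sorted (PySem.Set.ofList L) (fun x => x)).length
     then (-1 : Int)
     else PySem.List.pyGetD (PySem.List.sorted (PySem.Set.ofList L) (fun x => x))
            ((PySem.List.bisectLeft (PySem.List.sorted (PySem.Set.ofList L) (fun x => x)) idx : Nat) : Int) 0)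
      = (match PySem.List.min? ((PySem.Set.ofList L).filter (fun i => idx ≤ i)) (fun x => x) with
         | none => -1
         | some v => v) := by
  set ts := PySem.List.sorted (PySem.Set.ofList L) (fun x => x) with hts
  have hst : ts.Pairwise (· < ·) := PySem.List.sorted_ofList_pairwise_lt L
  have hle : ts.Pairwise (· ≤ ·) := hst.imp le_of_lt
  obtain ⟨hrle, hlt, hge⟩ := PySem.List.bisectLeft_spec ts idx hle
  set r := PySem.List.bisectLeft ts idx with hr
  have hmem : ∀ x : Int, x ∈ ts ↔ x ∈ PySem.Set.ofList L := by
    intro x; rw [hts, PySem.List.mem_sorted]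
  by_cases hcase : r = ts.length
  · -- no element ≥ idx: the filtered list is empty, both sides -1
    have hfil : (PySem.Set.ofList L).filter (fun i => idx ≤ i) = [] := by
      rw [List.filter_eq_nil_iff]
      intro x hx hxd
      obtain ⟨j, hj, hxe⟩ := List.mem_iff_getElem.1 ((hmem x).2 hx)
      have := hlt j hj (by omega)
      rw [hxe] at this
      exact absurd (of_decide_eq_true hxd) (not_le.2 this)
    rw [if_pos hcase, hfil]
    rfl
  · have hrlt : r < ts.length := lt_of_le_of_ne hrle hcase
    have hA : PySem.List.pyGetD ts (r : Int) 0 = ts[r] := by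
      rw [PySem.List.pyGetD_natCast, List.getD_eq_getElem ts 0 hrlt]
    have htr_mem : ts[r] ∈ (PySem.Set.ofList L).filter (fun i => idx ≤ i) := by
      rw [List.mem_filter]
      exact ⟨(hmem _).1 (List.getElem_mem hrlt), decide_eq_true (hge r hrlt le_rfl)⟩
    cases hmin : PySem.List.min? ((PySem.Set.ofList L).filter (fun i => idx ≤ i)) (fun x => x) with
    | none =>
      rw [PySem.List.min?_eq_none_iff] at hmin
      rw [hmin] at htr_mem
      simp at htr_mem
    | some m =>
      have hm_le : m ≤ ts[r] := PySem.List.min?_isMin hmin _ htr_mem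
      have hm_in := PySem.List.min?_mem hmin
      rw [List.mem_filter] at hm_in
      obtain ⟨hmS, hmd⟩ := hm_in
      obtain ⟨j, hj, hme⟩ := List.mem_iff_getElem.1 ((hmem m).2 hmS)
      have hmidx : idx ≤ m := of_decide_eq_true hmd
      have hrj : r ≤ j := by
        by_contra hc
        have := hlt j hj (by omega)
        rw [hme] at this; omega
      have hge_m : ts[r] ≤ m := by
        rcases eq_or_lt_of_le hrj with h | h
        · subst h; rw [hme]
        · have := List.pairwise_iff_getElem.1 hle r j hrlt hj h
          rw [hme] at this; exact this
      rw [if_neg hcase, hA]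
      exact le_antisymm hge_m hm_le

-- The answering loop, with the common set L, equals B's map over the queries.
theorem loop_eq (L : List Int) (arr : List (Int × Int)) :
    arr.foldl (fun res p =>
      if p.1 == 2 then
        let r := PySem.List.bisectLeft (PySem.List.sorted (PySem.Set.ofList L) (fun x => x)) p.2
        if r = (PySem.List.sorted (PySem.Set.ofList L) (fun x => x)).length then res ++ [(-1 : Int)]
        else res ++ [PySem.List.pyGetD (PySem.List.sorted (PySem.Set.ofList L) (fun x => x)) (r : Int) 0]
      else res) []
      = (arr.filter (fun p => p.1 == 2)).map (fun p =>
          match PySem.List.min? ((PySem.Set.ofList L).filter (fun i => p.2 ≤ i)) (fun x => x) with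
          | none => -1
          | some v => v) := by
  have hbody : (fun (res : List Int) (p : Int × Int) =>
      if p.1 == 2 then
        let r := PySem.List.bisectLeft (PySem.List.sorted (PySem.Set.ofList L) (fun x => x)) p.2
        if r = (PySem.List.sorted (PySem.Set.ofList L) (fun x => x)).length then res ++ [(-1 : Int)]
        else res ++ [PySem.List.pyGetD (PySem.List.sorted (PySem.Set.ofList L) (fun x => x)) (r : Int) 0]
      else res)
      = (fun (res : List Int) (p : Int × Int) =>
          if p.1 == 2 then
            res ++ [match PySem.List.min? ((PySem.Set.ofList L).filter (fun i => p.2 ≤ i)) (fun x => x) with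
                    | none => -1
                    | some v => v]
          else res) := by
    funext res p
    by_cases h2 : (p.1 == 2) = true
    · rw [if_pos h2, if_pos h2, ← point L p.2]
      show (if PySem.List.bisectLeft (PySem.List.sorted (PySem.Set.ofList L) (fun x => x)) p.2
              = (PySem.List.sorted (PySem.Set.ofList L) (fun x => x)).length
            then res ++ [(-1 : Int)]
            else res ++ [PySem.List.pyGetD (PySem.List.sorted (PySem.Set.ofList L) (fun x => x))
                  ((PySem.List.bisectLeft (PySem.List.sorted (PySem.Set.ofList L) (fun x => x)) p.2 : Nat) : Int) 0])
          = _
      split_ifs <;> rfl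
    · rw [if_neg h2, if_neg h2]
  rw [hbody, PySem.List.foldl_append_if, List.nil_append]

-- ===== VERDICT (by name: the statement is the Claim_ definition above) =====
theorem solution_spec : Claim_equal_solution := by
  intro arr _
  show solution arr = solution_alt arr
  unfold solution solution_alt
  rw [sets_eq]
  exact loop_eq _ arr
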